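-- pv_equiv track=rewrite | github.com/adityasaky/reproarch-dependency-crawler | arch-repo-makedepends-pull/makedepends-report.py | decode_pkginfo
-- ===== SOURCE A (Python) =====
-- def decode_pkginfo(pkginfo):
--     result_pkg = []
--     pkgname = ""
--     arch = ""
--     pkgver = ""
--
--     for line in pkginfo.splitlines():
--         if line.startswith("makedepend"):
--             pkg = line.split(" = ")[1]
--             result_pkg.append(pkg)
--         elif line.startswith("pkgname"):
--             pkgname = line.split(" = ")[1]
--         elif line.startswith("arch"):
--             arch = line.split(" = ")[1]
--         elif line.startswith("pkgver"):
--             pkgver = line.split(" = ")[1]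
--
--     return {"pkgname": pkgname, "pkgver": pkgver, "arch": arch}, result_pkg
-- ===== SOURCE B (Python) =====
-- def decode_pkginfo(pkginfo):
--     lines = pkginfo.splitlines()
--
--     def last(prefix):
--         vals = [l.split(" = ")[1] for l in lines if l.startswith(prefix)]
--         return vals[-1] if vals else ""
--
--     makedepends = [l.split(" = ")[1] for l in lines if l.startswith("makedepend")]
--     return ({"pkgname": last("pkgname"),
--              "pkgver": last("pkgver"),
--              "arch": last("arch")}, makedepends)
-- ===== Notes on version B (the rewrite author's own statement) =====
-- stated objective: simpler
-- what changed: Replaces the single stateful if/elif loop over four mutable variables with independent comprehension passes: one comprehension for makedepends and a last(prefix) helper (last matching value or '') for each metadata field; correct because no prefix among makedepend/pkgname/arch/pkgver is a prefix of another, so the elif chain never masks a branch.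
import Mathlib
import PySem

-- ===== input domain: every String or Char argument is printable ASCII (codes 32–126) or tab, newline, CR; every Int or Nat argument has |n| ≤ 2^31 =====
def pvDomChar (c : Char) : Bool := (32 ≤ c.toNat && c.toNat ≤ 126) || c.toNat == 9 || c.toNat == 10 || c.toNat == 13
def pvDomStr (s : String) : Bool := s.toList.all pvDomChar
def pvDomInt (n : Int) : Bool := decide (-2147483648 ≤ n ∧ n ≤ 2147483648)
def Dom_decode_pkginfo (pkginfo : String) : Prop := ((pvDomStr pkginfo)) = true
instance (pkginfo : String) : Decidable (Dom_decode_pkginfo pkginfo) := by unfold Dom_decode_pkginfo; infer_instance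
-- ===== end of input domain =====

-- B replaces A's single stateful if/elif loop by independent comprehension passes
-- (one filter+map per field, last match wins); same return value, proved equal on Pre_.

-- ===== PORT A =====
-- line.split(" = ")[1]; exact under Pre_ (the line then contains " = ", so index 1 exists)
def pvA_val (line : String) : String := ((PySem.Str.split? line " = ").getD []).getD 1 ""

-- loop body: state = (result_pkg, pkgname, arch, pkgver)
def pvA_step (st : List String × String × String × String) (line : String) :
    List String × String × String × String :=
  if PySem.Str.startswith line "makedepend" then
    (st.1 ++ [pvA_val line], st.2.1, st.2.2.1, st.2.2.2)
  else if PySem.Str.startswith line "pkgname" then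
    (st.1, pvA_val line, st.2.2.1, st.2.2.2)
  else if PySem.Str.startswith line "arch" then
    (st.1, st.2.1, pvA_val line, st.2.2.2)
  else if PySem.Str.startswith line "pkgver" then
    (st.1, st.2.1, st.2.2.1, pvA_val line)
  else st

def decode_pkginfo (pkginfo : String) : (List (String × String)) × List String :=
  let st := (PySem.Str.splitlines pkginfo).foldl pvA_step ([], "", "", "")
  ([("pkgname", st.2.1), ("pkgver", st.2.2.2), ("arch", st.2.2.1)], st.1)

-- ===== PORT B =====
-- l.split(" = ")[1]; exact under Pre_ (the line then contains " = ", so index 1 exists)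
def pvB_val (line : String) : String := ((PySem.Str.split? line " = ").getD []).getD 1 ""

-- vals[-1] if vals else "" on [l.split(" = ")[1] for l in lines if l.startswith(prefix)]
def pvB_last (lines : List String) (pfx : String) : String :=
  ((lines.filter (fun l => PySem.Str.startswith l pfx)).map pvB_val).getLastD ""

def decode_pkginfo_alt (pkginfo : String) : (List (String × String)) × List String :=
  let lines := PySem.Str.splitlines pkginfo
  ([("pkgname", pvB_last lines "pkgname"),
    ("pkgver", pvB_last lines "pkgver"),
    ("arch", pvB_last lines "arch")],
   (lines.filter (fun l => PySem.Str.startswith l "makedepend")).map pvB_val)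

-- ===== PRECONDITION & SPEC =====
-- Pre_ excludes exactly the inputs where A (and B) raise IndexError: some line starting
-- with one of the four prefixes does not contain " = ", so split(" = ")[1] fails.
def Pre_decode_pkginfo (pkginfo : String) : Prop :=
  (PySem.Str.splitlines pkginfo).all (fun l =>
    !(PySem.Str.startswith l "makedepend" || PySem.Str.startswith l "pkgname" ||
      PySem.Str.startswith l "arch" || PySem.Str.startswith l "pkgver")
    || PySem.Str.isIn " = " l) = true
instance (pkginfo : String) : Decidable (Pre_decode_pkginfo pkginfo) := by
  unfold Pre_decode_pkginfo; infer_instance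

def pvWitness_decode_pkginfo : String :=
  "pkgname = foo\nmakedepend = bar\narch = x86_64\npkgver = 1.2"

def Spec_decode_pkginfo (pkginfo : String) (out : (List (String × String)) × List String) : Prop := out = decode_pkginfo_alt pkginfo
instance (pkginfo : String) (out : (List (String × String)) × List String) : Decidable (Spec_decode_pkginfo pkginfo out) := by unfold Spec_decode_pkginfo; infer_instance

-- ===== CLAIM (what is proved, stated in full; the proofs are below) =====
def Claim_equal_decode_pkginfo : Prop := ∀ (pkginfo : String), Dom_decode_pkginfo pkginfo → Pre_decode_pkginfo pkginfo → Spec_decode_pkginfo pkginfo (decode_pkginfo pkginfo)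

-- ===== LEMMAS AND PROOFS =====

-- incomparable prefixes cannot both be prefixes of the same string
theorem pv_not_both (p q s : String) (h : ¬ p.toList <+: q.toList) (h' : ¬ q.toList <+: p.toList)
    (hp : PySem.Str.startswith s p = true) : PySem.Str.startswith s q = false := by
  by_contra hq
  rw [Bool.not_eq_false] at hq
  simp only [PySem.Str.startswith_eq, PySem.Chars.startswith_iff] at hp hq
  rcases List.prefix_or_prefix_of_prefix hp hq with h1 | h1
  · exact h h1
  · exact h' h1

theorem pvA_fold_eq (lines : List String) (r : List String) (n a v : String) :
    lines.foldl pvA_step (r, n, a, v) =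
      (r ++ (lines.filter (fun l => PySem.Str.startswith l "makedepend")).map pvB_val,
       ((lines.filter (fun l => PySem.Str.startswith l "pkgname")).map pvB_val).getLastD n,
       ((lines.filter (fun l => PySem.Str.startswith l "arch")).map pvB_val).getLastD a,
       ((lines.filter (fun l => PySem.Str.startswith l "pkgver")).map pvB_val).getLastD v) := by
  induction lines generalizing r n a v with
  | nil => simp
  | cons l ls ih =>
    have hval : pvA_val l = pvB_val l := rfl
    by_cases h1 : PySem.Str.startswith l "makedepend" = true
    · have h2 := pv_not_both "makedepend" "pkgname" l (by decide) (by decide) h1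
      have h3 := pv_not_both "makedepend" "arch" l (by decide) (by decide) h1
      have h4 := pv_not_both "makedepend" "pkgver" l (by decide) (by decide) h1
      simp only [List.foldl_cons, List.filter_cons, pvA_step, h1, h2, h3, h4,
        eq_self_iff_true, if_true, Bool.false_eq_true, if_false, ih, hval,
        List.map_cons, List.append_assoc, List.singleton_append]
    · have h1' : PySem.Str.startswith l "makedepend" = false := by
        cases hb : PySem.Str.startswith l "makedepend" <;> simp_all
      by_cases h2 : PySem.Str.startswith l "pkgname" = true
      · have h3 := pv_not_both "pkgname" "arch" l (by decide) (by decide) h2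
        have h4 := pv_not_both "pkgname" "pkgver" l (by decide) (by decide) h2
        simp only [List.foldl_cons, List.filter_cons, pvA_step, h1', h2, h3, h4,
          eq_self_iff_true, if_true, Bool.false_eq_true, if_false, ih, hval,
          List.map_cons, List.getLastD_cons]
      · have h2' : PySem.Str.startswith l "pkgname" = false := by
          cases hb : PySem.Str.startswith l "pkgname" <;> simp_all
        by_cases h3 : PySem.Str.startswith l "arch" = true
        · have h4 := pv_not_both "arch" "pkgver" l (by decide) (by decide) h3
          simp only [List.foldl_cons, List.filter_cons, pvA_step, h1', h2', h3, h4,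
            eq_self_iff_true, if_true, Bool.false_eq_true, if_false, ih, hval,
            List.map_cons, List.getLastD_cons]
        · have h3' : PySem.Str.startswith l "arch" = false := by
            cases hb : PySem.Str.startswith l "arch" <;> simp_all
          by_cases h4 : PySem.Str.startswith l "pkgver" = true
          · simp only [List.foldl_cons, List.filter_cons, pvA_step, h1', h2', h3', h4,
              eq_self_iff_true, if_true, Bool.false_eq_true, if_false, ih, hval,
              List.map_cons, List.getLastD_cons]
          · have h4' : PySem.Str.startswith l "pkgver" = false := by
              cases hb : PySem.Str.startswith l "pkgver" <;> simp_all
            simp only [List.foldl_cons, List.filter_cons, pvA_step, h1', h2', h3', h4',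
              Bool.false_eq_true, if_false, ih]

-- ===== VERDICT (by name: the statement is the Claim_ definition above) =====
theorem decode_pkginfo_spec : Claim_equal_decode_pkginfo := by
  intro pkginfo _ _
  show decode_pkginfo pkginfo = decode_pkginfo_alt pkginfo
  simp [decode_pkginfo, decode_pkginfo_alt, pvA_fold_eq, pvB_last]
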